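-- pv_equiv track=rewrite | github.com/jfullerton44/AdventOfCode2025 | Day2/main.py | is_num_valid
-- ===== SOURCE A (Python) =====
-- def is_num_valid(num: int) -> bool:
--     """
--     Check if a number contains a repeating sequence pattern.
--
--     Args:
--         num: The number to validate.
--
--     Returns:
--         True if the number does NOT have a repeating sequence pattern.
--     """
--     num_str = str(num)
--
--     for seq_len in range(1, 11):
--         if len(num_str) % seq_len == 0:
--             sequence = num_str[:seq_len]
--             pos = seq_len
--
--             while pos + seq_len <= len(num_str):
--                 if sequence != num_str[pos : pos + seq_len]:
--                     break
--                 if pos + seq_len == len(num_str):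
--                     return False
--                 pos += seq_len
--
--     return True
-- ===== SOURCE B (Python) =====
-- def is_num_valid(num: int) -> bool:
--     """True iff str(num) is not a repetition (>=2 copies) of a block of length <= 10."""
--     s = str(num)
--     k = (s + s).find(s, 1)
--     return not (k < len(s) and k <= 10)
-- ===== Notes on version B (the rewrite author's own statement) =====
-- stated objective: idiomatic
-- what changed: Replaces the divisor loop with inner chunk-comparison scans by the classic doubled-string trick: the minimal rotation period k=(s+s).find(s,1) decides repetition in one string search.
import Mathlib
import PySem

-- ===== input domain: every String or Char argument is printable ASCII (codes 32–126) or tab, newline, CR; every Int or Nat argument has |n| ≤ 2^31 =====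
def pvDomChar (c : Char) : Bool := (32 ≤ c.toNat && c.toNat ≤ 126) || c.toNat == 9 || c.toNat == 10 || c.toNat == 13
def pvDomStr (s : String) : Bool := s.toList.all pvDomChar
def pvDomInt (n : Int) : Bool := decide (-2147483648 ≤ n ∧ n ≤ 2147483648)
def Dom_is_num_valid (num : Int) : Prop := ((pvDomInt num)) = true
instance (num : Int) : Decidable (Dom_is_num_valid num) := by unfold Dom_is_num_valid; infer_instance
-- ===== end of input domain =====

-- B replaces A's divisor loop with inner chunk scans by the doubled-string minimal-rotation
-- test (s+s).find(s, 1); equal return value on every input (proved below for all Int).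

-- ===== PORT A =====
-- the inner 'while pos + seq_len <= len(num_str)' loop of A; fuel only bounds iterations
def pvWhileA (numStr seq : List Char) (seqLen : Nat) : Nat → Nat → Bool
  | _, 0 => false
  | pos, fuel+1 =>
    if pos + seqLen ≤ numStr.length then
      if seq ≠ PySem.List.slice numStr (some (pos : Int)) (some ((pos : Int) + (seqLen : Int))) then
        false            -- 'break' out of the while loop: no return happened
      else if pos + seqLen = numStr.length then
        true             -- 'return False' in A
      else
        pvWhileA numStr seq seqLen (pos + seqLen) fuel
    else false

def is_num_valid (num : Int) : Bool :=
  let numStr := PySem.Int.toChars num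
  !((PySem.List.pyRange 1 11 1).any fun seqLen =>
      decide (PySem.Int.mod (PySem.List.len numStr) seqLen = 0) &&
        pvWhileA numStr (PySem.List.slice numStr none (some seqLen)) seqLen.toNat seqLen.toNat
          (numStr.length + 1))

-- ===== PORT B =====
def is_num_valid_alt (num : Int) : Bool :=
  let s := PySem.Int.toChars num
  let k := PySem.Chars.findFrom (s ++ s) s 1
  !(decide (k < PySem.List.len s) && decide (k ≤ 10))

-- ===== PRECONDITION & SPEC =====
def Spec_is_num_valid (num : Int) (out : Bool) : Prop := out = is_num_valid_alt num
instance (num : Int) (out : Bool) : Decidable (Spec_is_num_valid num out) := by unfold Spec_is_num_valid; infer_instance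

-- ===== CLAIM (what is proved, stated in full; the proofs are below) =====
def Claim_equal_is_num_valid : Prop := ∀ (num : Int), Dom_is_num_valid num → Spec_is_num_valid num (is_num_valid num)

-- ===== LEMMAS AND PROOFS =====

-- s occurs in s++s at offset j:
def pvOcc (s : List Char) (j : Nat) : Prop := s <+: (s ++ s).drop j
-- s is fixed by the cyclic rotation by j:
def pvRot (s : List Char) (j : Nat) : Prop := ∀ i < s.length, s[(i + j) % s.length]? = s[i]?
-- s is p-periodic:
def pvPer (s : List Char) (p : Nat) : Prop := ∀ i < s.length, s[i]? = s[i % p]?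

lemma pvPrefixIff (l1 l2 : List Char) :
    l1 <+: l2 ↔ l1.length ≤ l2.length ∧ ∀ i < l1.length, l1[i]? = l2[i]? := by
  constructor
  · rintro ⟨t, rfl⟩
    exact ⟨by simp, fun i hi => (List.getElem?_append_left hi).symm⟩
  · rintro ⟨hlen, h⟩
    rw [List.prefix_iff_eq_take]
    apply List.ext_getElem?
    intro i
    by_cases hi : i < l1.length
    · rw [h i hi, List.getElem?_take_of_lt hi]
    · rw [List.getElem?_eq_none (by omega), List.getElem?_eq_none (by simp; omega)]

lemma pvToDigitsCoreLen (b f n : Nat) (acc : List Char) :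
    acc.length ≤ (Nat.toDigitsCore b f n acc).length := by
  induction f generalizing n acc with
  | zero => simp [Nat.toDigitsCore]
  | succ f ih =>
    simp only [Nat.toDigitsCore]
    split
    · simp
    · exact le_trans (by simp) (ih _ _)

lemma pvToCharsNeNil (n : Int) : PySem.Int.toChars n ≠ [] := by
  have key : ∀ m : Nat, Nat.toDigits 10 m ≠ [] := by
    intro m hnil
    have h := pvToDigitsCoreLen 10 m (m / 10) [Nat.digitChar (m % 10)]
    unfold Nat.toDigits at hnil
    simp only [Nat.toDigitsCore] at hnil
    split at hnil
    · simp at hnil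
    · rw [hnil] at h; simp at h
  unfold PySem.Int.toChars
  split
  · simp
  · exact key _

lemma pvOcc_iff_rot (s : List Char) (j : Nat) (_hL : 0 < s.length) (hj : j ≤ s.length) :
    pvOcc s j ↔ pvRot s j := by
  unfold pvOcc pvRot
  rw [pvPrefixIff]
  have hlen : ((s ++ s).drop j).length = s.length + s.length - j := by simp
  constructor
  · rintro ⟨-, h⟩ i hi
    have h2 := h i hi
    rw [List.getElem?_drop] at h2
    by_cases hc : j + i < s.length
    · rw [List.getElem?_append_left hc] at h2
      rw [Nat.mod_eq_of_lt (by omega), show i + j = j + i by ring]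
      exact h2.symm
    · rw [List.getElem?_append_right (by omega)] at h2
      have e : (i + j) % s.length = j + i - s.length := by
        rw [show i + j = j + i by ring, Nat.mod_eq_sub_mod (by omega), Nat.mod_eq_of_lt (by omega)]
      rw [e]
      exact h2.symm
  · intro h
    refine ⟨by omega, fun i hi => ?_⟩
    rw [List.getElem?_drop]
    have h2 := h i hi
    by_cases hc : j + i < s.length
    · rw [List.getElem?_append_left hc]
      rw [Nat.mod_eq_of_lt (by omega), show i + j = j + i by ring] at h2
      exact h2.symm
    · rw [List.getElem?_append_right (by omega)]
      have e : (i + j) % s.length = j + i - s.length := by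
        rw [show i + j = j + i by ring, Nat.mod_eq_sub_mod (by omega), Nat.mod_eq_of_lt (by omega)]
      rw [e] at h2
      exact h2.symm

lemma pvPerOfStep (s : List Char) (d : Nat) (hd : 0 < d) (_hdvd : d ∣ s.length)
    (h : ∀ i < s.length, s[(i + d) % s.length]? = s[i]?) : pvPer s d := by
  intro i
  induction i using Nat.strong_induction_on with
  | _ i ih =>
    intro hi
    by_cases hc : i < d
    · rw [Nat.mod_eq_of_lt hc]
    · have h1 := h (i - d) (by omega)
      have e : (i - d + d) % s.length = i := by
        rw [Nat.sub_add_cancel (by omega), Nat.mod_eq_of_lt hi]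
      rw [e] at h1
      have h2 := ih (i - d) (by omega) (by omega)
      have e2 : (i - d) % d = i % d := by
        conv_rhs => rw [show i = (i - d) + d by omega, Nat.add_mod_right]
      rw [h1, h2, e2]

lemma pvRotIter (s : List Char) (j : Nat) (hL : 0 < s.length) (h : pvRot s j) :
    ∀ t, ∀ i < s.length, s[(i + t * j) % s.length]? = s[i]? := by
  intro t
  induction t with
  | zero => intro i hi; simp [Nat.mod_eq_of_lt hi]
  | succ t ih =>
    intro i hi
    have e : (i + (t + 1) * j) % s.length = ((i + t * j) % s.length + j) % s.length := by
      rw [show i + (t+1)*j = (i + t*j) + j by ring, Nat.add_mod, Nat.add_mod ((i + t*j) % s.length) j]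
      rw [Nat.mod_mod_of_dvd _ dvd_rfl]
    rw [e, h _ (Nat.mod_lt _ hL), ih i hi]

lemma pvBezout (j L : Nat) (hL : 0 < L) : ∃ t : Nat, (t * j) % L = Nat.gcd j L % L := by
  have hL' : (L : Int) ≠ 0 := by exact_mod_cast hL.ne'
  refine ⟨((Nat.gcdA j L) % (L : Int)).toNat, ?_⟩
  have h1 : (0:Int) ≤ Nat.gcdA j L % L := Int.emod_nonneg _ hL'
  have h2 : ((((Nat.gcdA j L) % (L:Int)).toNat : Int)) = Nat.gcdA j L % L := Int.toNat_of_nonneg h1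
  have key : ((((Nat.gcdA j L) % (L:Int)).toNat : Int) * j) % L = (Nat.gcd j L : Int) % L := by
    rw [Int.mul_emod, h2, Int.emod_emod_of_dvd _ dvd_rfl, ← Int.mul_emod]
    have hab := Nat.gcd_eq_gcd_ab j L
    have e2 : (Nat.gcdA j L) * j = (Nat.gcd j L : Int) - L * Nat.gcdB j L := by linarith
    rw [e2, Int.sub_emod, Int.mul_emod_right]
    simp
  push_cast at key
  exact_mod_cast key

lemma pvPer_gcd_of_rot (s : List Char) (j : Nat) (hj : 0 < j) (hjL : j < s.length)
    (h : pvRot s j) : pvPer s (Nat.gcd j s.length) := by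
  have hL : 0 < s.length := by omega
  obtain ⟨t, ht⟩ := pvBezout j s.length hL
  have hd : 0 < Nat.gcd j s.length := Nat.gcd_pos_of_pos_left _ hj
  have hdle : Nat.gcd j s.length ≤ j := Nat.gcd_le_left _ hj
  apply pvPerOfStep s _ hd (Nat.gcd_dvd_right _ _)
  intro i hi
  have e : (i + Nat.gcd j s.length) % s.length = (i + t * j) % s.length := by
    conv_rhs => rw [Nat.add_mod, ht]
    rw [Nat.mod_eq_of_lt hi, Nat.mod_eq_of_lt (show Nat.gcd j s.length < s.length by omega)]
  rw [e, pvRotIter s j hL h t i hi]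

lemma pvRot_of_per (s : List Char) (p : Nat) (_hp : 0 < p) (hdvd : p ∣ s.length)
    (_hlt : p < s.length) (h : pvPer s p) : pvRot s p := by
  intro i hi
  by_cases hc : i + p < s.length
  · rw [Nat.mod_eq_of_lt hc, h (i + p) hc, Nat.add_mod_right, ← h i hi]
  · have e : (i + p) % s.length = i + p - s.length := by
      rw [Nat.mod_eq_sub_mod (by omega), Nat.mod_eq_of_lt (by omega)]
    have hm : i + p - s.length < s.length := by omega
    rw [e, h _ hm, h i hi]
    congr 1
    obtain ⟨c, hc2⟩ := hdvd
    have hcp : (c - 1) * p = s.length - p := by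
      rw [Nat.sub_mul, one_mul, hc2, Nat.mul_comm p c]
    have hi2 : i = (i + p - s.length) + (c - 1) * p := by omega
    conv_rhs => rw [hi2, Nat.add_mul_mod_self_right]

lemma pvWhileA_true_iff (s seq : List Char) (k : Nat) (hk : 0 < k) :
    ∀ fuel pos, s.length + 1 ≤ fuel + pos →
      (pvWhileA s seq k pos fuel = true ↔
        ∃ m, 1 ≤ m ∧ pos + m * k = s.length ∧
          ∀ t < m, seq = (s.drop (pos + t * k)).take k) := by
  intro fuel
  induction fuel with
  | zero =>
    intro pos hfuel
    simp only [pvWhileA]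
    constructor
    · intro h; exact absurd h (by simp)
    · rintro ⟨m, hm, he, -⟩
      exfalso; nlinarith
  | succ fuel ih =>
    intro pos hfuel
    simp only [pvWhileA]
    rw [PySem.List.slice_natCast_add]
    by_cases h1 : pos + k ≤ s.length
    · rw [if_pos h1]
      by_cases h2 : seq = (s.drop pos).take k
      · rw [if_neg (by simpa using h2)]
        by_cases h3 : pos + k = s.length
        · rw [if_pos h3]
          constructor
          · intro _
            exact ⟨1, le_refl _, by omega, by
              intro t ht
              have : t = 0 := by omega
              subst this
              simpa using h2⟩
          · intro _; rfl
        · rw [if_neg h3]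
          rw [ih (pos + k) (by omega)]
          constructor
          · rintro ⟨m, hm, he, hc⟩
            refine ⟨m + 1, by omega, by rw [Nat.add_mul, one_mul]; omega, ?_⟩
            intro t ht
            match t with
            | 0 => simpa using h2
            | t + 1 =>
              have := hc t (by omega)
              rw [this]
              congr 2
              ring
          · rintro ⟨m, hm, he, hc⟩
            have hm2 : 2 ≤ m := by
              by_contra hcon
              have hm1 : m = 1 := by omega
              rw [hm1, one_mul] at he
              omega
            refine ⟨m - 1, by omega, by
              have h5 : (m - 1) * k = m * k - k := by rw [Nat.sub_mul, one_mul]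
              have h6 : k ≤ m * k := Nat.le_mul_of_pos_left k (by omega)
              omega, ?_⟩
            intro t ht
            have := hc (t + 1) (by omega)
            rw [this]
            congr 2
            ring
      · rw [if_pos (by simpa using h2)]
        constructor
        · intro h; exact absurd h (by simp)
        · rintro ⟨m, hm, he, hc⟩
          exfalso
          exact h2 (by simpa using hc 0 hm)
    · rw [if_neg h1]
      constructor
      · intro h; exact absurd h (by simp)
      · rintro ⟨m, hm, he, -⟩
        exfalso; nlinarith

lemma pvChunks (s : List Char) (p : Nat) (hp : 0 < p) :
    (∃ m, 1 ≤ m ∧ p + m * p = s.length ∧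
        ∀ t < m, s.take p = (s.drop (p + t * p)).take p) ↔
      (2 * p ≤ s.length ∧ p ∣ s.length ∧ pvPer s p) := by
  constructor
  · rintro ⟨m, hm, he, hc⟩
    refine ⟨by nlinarith, ⟨m + 1, by rw [Nat.mul_add, Nat.mul_one, Nat.mul_comm]; omega⟩, ?_⟩
    intro i hi
    set q := i / p with hq
    have hqe : q * p + i % p = i := by
      rw [hq, Nat.mul_comm, Nat.div_add_mod]
    have hmod : i % p < p := Nat.mod_lt _ hp
    by_cases hq0 : q = 0
    · have h0 : q * p = 0 := by rw [hq0]; ring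
      have hip : i < p := by omega
      rw [Nat.mod_eq_of_lt hip]
    · have hqm : q - 1 < m := by
        by_contra hcon
        have h1 : m + 1 ≤ q := by omega
        have h2 : (m + 1) * p ≤ q * p := Nat.mul_le_mul_right p h1
        have h3 : (m + 1) * p = m * p + p := by ring
        omega
      have := hc (q - 1) hqm
      have he2 : p + (q - 1) * p = q * p := by
        have : (q - 1) * p = q * p - p := by rw [Nat.sub_mul, one_mul]
        have : p ≤ q * p := by nlinarith [Nat.one_le_iff_ne_zero.mpr hq0]
        omega
      rw [he2] at this
      have h1 : (s.take p)[i % p]? = ((s.drop (q * p)).take p)[i % p]? := by rw [this]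
      rw [List.getElem?_take_of_lt hmod, List.getElem?_take_of_lt hmod, List.getElem?_drop] at h1
      rw [hqe] at h1
      exact h1.symm
  · rintro ⟨hle, ⟨c, hc⟩, hper⟩
    have hc2 : 2 ≤ c := by nlinarith
    refine ⟨c - 1, by omega, by
      have : (c - 1) * p = c * p - p := by rw [Nat.sub_mul, one_mul]
      have : p * c = c * p := Nat.mul_comm _ _
      omega, ?_⟩
    intro t ht
    apply List.ext_getElem?
    intro i
    by_cases hi : i < p
    · rw [List.getElem?_take_of_lt hi, List.getElem?_take_of_lt hi, List.getElem?_drop]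
      have hidx : p + t * p + i < s.length := by
        have h1 : p + t * p + i < p + (t + 1) * p := by nlinarith
        have h2 : p + (t + 1) * p ≤ p + (c - 1) * p := by
          have : t + 1 ≤ c - 1 := by omega
          nlinarith
        have h3 : (c - 1) * p = c * p - p := by rw [Nat.sub_mul, one_mul]
        have h4 : p * c = c * p := Nat.mul_comm _ _
        omega
      have e1 := hper (p + t * p + i) hidx
      have e2 := hper i (by omega : i < s.length)
      rw [e1, e2]
      conv_rhs => rw [show p + t * p + i = i + (1 + t) * p by ring, Nat.add_mul_mod_self_right]
    · rw [List.getElem?_eq_none (by simp; omega), List.getElem?_eq_none (by simp; omega)]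

lemma pvA_false_iff (num : Int) :
    is_num_valid num = false ↔
      ∃ p : Nat, 1 ≤ p ∧ p ≤ 10 ∧ p < (PySem.Int.toChars num).length ∧
        p ∣ (PySem.Int.toChars num).length ∧ pvPer (PySem.Int.toChars num) p := by
  set s := PySem.Int.toChars num with hs
  unfold is_num_valid
  rw [← hs]
  simp only [Bool.not_eq_false', List.any_eq_true, Bool.and_eq_true, decide_eq_true_eq,
    PySem.List.len_eq]
  constructor
  · rintro ⟨x, hx, hmod, hwh⟩
    rw [PySem.List.mem_pyRange_one] at hx
    set p := x.toNat with _hp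
    have hxp : x = (p : Int) := by omega
    have hp1 : 1 ≤ p := by omega
    rw [PySem.Int.mod_eq_zero_iff_dvd, hxp, Int.natCast_dvd_natCast] at hmod
    rw [hxp, PySem.List.slice_to_natCast] at hwh
    have hiff := pvWhileA_true_iff s (s.take p) p (by omega) (s.length + 1) p (by omega)
    have hch := (pvChunks s p (by omega)).mp (hiff.mp hwh)
    exact ⟨p, hp1, by omega, by omega, hmod, hch.2.2⟩
  · rintro ⟨p, hp1, hp10, hpL, hdvd, hper⟩
    refine ⟨(p : Int), ?_, ?_, ?_⟩
    · rw [PySem.List.mem_pyRange_one]; omega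
    · rw [PySem.Int.mod_eq_zero_iff_dvd, Int.natCast_dvd_natCast]; exact hdvd
    · rw [PySem.List.slice_to_natCast, Int.toNat_natCast]
      apply (pvWhileA_true_iff s (s.take p) p (by omega) (s.length + 1) p (by omega)).mpr
      apply (pvChunks s p (by omega)).mpr
      refine ⟨?_, hdvd, hper⟩
      obtain ⟨c, hc⟩ := hdvd
      have hc2 : 2 ≤ c := by nlinarith
      nlinarith

lemma pvB_false_iff (num : Int) :
    is_num_valid_alt num = false ↔
      ∃ j : Nat, 1 ≤ j ∧ j ≤ 10 ∧ j < (PySem.Int.toChars num).length ∧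
        pvOcc (PySem.Int.toChars num) j := by
  set s := PySem.Int.toChars num with hs
  have hL : 0 < s.length := List.length_pos_of_ne_nil (pvToCharsNeNil num)
  unfold is_num_valid_alt
  rw [← hs]
  simp only [Bool.not_eq_false', Bool.and_eq_true, decide_eq_true_eq, PySem.List.len_eq]
  have hrw := PySem.Chars.findFrom_natCast (s ++ s) s 1 (by simp; omega)
  rw [Nat.cast_one] at hrw
  have hinfix : s <:+: (s ++ s).drop 1 := by
    rw [List.drop_append_of_le_length (by omega)]
    exact (List.suffix_append _ s).isInfix
  have hfne : PySem.Chars.find ((s ++ s).drop 1) s ≠ -1 :=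
    (PySem.Chars.find_ne_neg_one_iff _ _).mpr hinfix
  have hfnn : (0 : Int) ≤ PySem.Chars.find ((s ++ s).drop 1) s :=
    (PySem.Chars.find_nonneg_iff _ _).mpr hinfix
  rw [hrw, if_neg hfne]
  set f := PySem.Chars.find ((s ++ s).drop 1) s with hf
  obtain ⟨hpre, hmin⟩ := PySem.Chars.find_spec hfnn
  set K := 1 + f.toNat with hK
  have hocc : pvOcc s K := by
    unfold pvOcc
    rw [hK, ← List.drop_drop]
    exact hpre
  have hKL : K ≤ s.length := by
    have h1 := hocc.length_le
    simp only [List.length_drop, List.length_append] at h1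
    omega
  have hcast : 1 + f = (K : Int) := by rw [hK]; push_cast; omega
  rw [hcast]
  constructor
  · rintro ⟨h1, h2⟩
    exact ⟨K, by omega, by exact_mod_cast h2, by exact_mod_cast h1, hocc⟩
  · rintro ⟨j, hj1, hj10, hjL, hjocc⟩
    have hKj : K ≤ j := by
      by_contra hcon
      have hjlt : j - 1 < f.toNat := by omega
      have := hmin (j - 1) hjlt
      rw [List.drop_drop, show 1 + (j - 1) = j by omega] at this
      exact this hjocc
    constructor
    · exact_mod_cast show K < s.length by omega
    · exact_mod_cast show K ≤ 10 by omega

lemma pvMain (num : Int) : is_num_valid num = is_num_valid_alt num := by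
  set s := PySem.Int.toChars num with hs
  have hL : 0 < s.length := List.length_pos_of_ne_nil (pvToCharsNeNil num)
  have hiff : is_num_valid num = false ↔ is_num_valid_alt num = false := by
    rw [pvA_false_iff, pvB_false_iff, ← hs]
    constructor
    · rintro ⟨p, hp1, hp10, hpL, hdvd, hper⟩
      exact ⟨p, hp1, hp10, hpL,
        (pvOcc_iff_rot s p hL (by omega)).mpr (pvRot_of_per s p (by omega) hdvd hpL hper)⟩
    · rintro ⟨j, hj1, hj10, hjL, hjocc⟩
      have hrot := (pvOcc_iff_rot s j hL (by omega)).mp hjocc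
      have hper := pvPer_gcd_of_rot s j (by omega) hjL hrot
      have hdle : Nat.gcd j s.length ≤ j := Nat.gcd_le_left _ (by omega)
      have hdpos : 0 < Nat.gcd j s.length := Nat.gcd_pos_of_pos_left _ (by omega)
      exact ⟨Nat.gcd j s.length, by omega, by omega, by omega, Nat.gcd_dvd_right _ _, hper⟩
  cases hA : is_num_valid num <;> cases hB : is_num_valid_alt num <;> simp_all

-- ===== VERDICT (by name: the statement is the Claim_ definition above) =====
theorem is_num_valid_spec : Claim_equal_is_num_valid := by
  intro num _
  unfold Spec_is_num_valid
  exact pvMain num
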